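-- pv_equiv track=rewrite | github.com/yubinbai/pcuva-problems | UVa 11503 - Virtual Friends/main.py | solve
-- ===== SOURCE A (Python) =====
-- def solve(par):
--     def find(i):
--         if parent[i][0] != i:
--             parent[i] = find(parent[i][0])
--         return parent[i]
--
--     def union(i, j):
--         p1 = find(i)
--         p2 = find(j)
--         parent[p1[0]] = (p2[0], p1[1] + p2[1])
--         parent[p2[0]] = (p2[0], p1[1] + p2[1])
--
--     N, comb = par
--     # make disjoint set
--     parent = {}  # 'key':(parent, number)
--
--     results = []
--     for c in comb:
--         c1, c2 = c
--         if c1 not in parent: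
--             parent[c1] = (c1, 1)
--         if c2 not in parent:
--             parent[c2] = (c2, 1)
--         union(c1, c2)
--         results.append(find(c1)[1])
--
--     return '\n'.join(str(e) for e in results)
-- ===== SOURCE B (Python) =====
-- def _find(parent, i):
--     # iterative two-pass find: walk to the root, then compress the visited path
--     path = []
--     k = i
--     while parent[k][0] != k:
--         path.append(k)
--         k = parent[k][0]
--     root = parent[k]
--     for n in reversed(path):
--         parent[n] = root
--     return root
--
--
-- def solve(par):
--     N, comb = par
--     parent = {}
--     out = []
--     for c1, c2 in comb:
--         if c1 not in parent:
--             parent[c1] = (c1, 1)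
--         if c2 not in parent:
--             parent[c2] = (c2, 1)
--         p1 = _find(parent, c1)
--         p2 = _find(parent, c2)
--         merged = (p2[0], p1[1] + p2[1])
--         parent[p1[0]] = merged
--         parent[p2[0]] = merged
--         out.append(str(_find(parent, c1)[1]))
--     return '\n'.join(out)
-- ===== Notes on version B (the rewrite author's own statement) =====
-- stated objective: alternative
-- what changed: find is rewritten from a recursive function that compresses on the unwind into an iterative two-pass routine (walk to the root collecting the path, then overwrite the visited nodes with the root tuple); the same key->(parent,count) dict, root choice and count arithmetic are kept, so outputs are byte-identical.
import Mathlib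
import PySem

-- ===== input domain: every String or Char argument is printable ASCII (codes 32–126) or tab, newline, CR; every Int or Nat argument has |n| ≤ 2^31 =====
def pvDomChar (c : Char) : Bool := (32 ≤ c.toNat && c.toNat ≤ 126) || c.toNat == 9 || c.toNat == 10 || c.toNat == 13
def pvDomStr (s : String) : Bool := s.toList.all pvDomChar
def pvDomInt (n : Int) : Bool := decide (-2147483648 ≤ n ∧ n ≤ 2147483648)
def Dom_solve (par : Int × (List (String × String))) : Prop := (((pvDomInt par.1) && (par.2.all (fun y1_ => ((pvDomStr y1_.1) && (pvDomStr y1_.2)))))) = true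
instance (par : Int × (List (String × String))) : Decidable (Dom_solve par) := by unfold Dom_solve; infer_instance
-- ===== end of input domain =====

-- B replaces A's recursive path-compressing find by an iterative two-pass find (walk to the
-- root, then compress the visited path); same dict, same roots and counts, same output.

-- ===== PORT A =====
-- A's recursive `find` with path compression; fuel bounds the recursion depth (the Python
-- recursion always terminates on reachable dicts, whose parent chains are acyclic and no
-- longer than the dict, so fuel = size + 1 is never exhausted there).
def findA (fuel : Nat) (d : PySem.Dict String (String × Int)) (i : String) :
    ((String × Int) × PySem.Dict String (String × Int)) :=
  match fuel with
  | 0 => ((i, 0), d)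
  | Nat.succ f =>
    match d.get? i with
    | none => ((i, 0), d)   -- KeyError cannot occur at A's call sites (keys inserted first)
    | some pc =>
      if pc.1 ≠ i then
        let r := findA f d pc.1
        (r.1, r.2.insert i r.1)   -- parent[i] = find(parent[i][0]); return parent[i]
      else (pc, d)

def unionA (d : PySem.Dict String (String × Int)) (i j : String) :
    PySem.Dict String (String × Int) :=
  let r1 := findA (d.size + 1) d i
  let r2 := findA (r1.2.size + 1) r1.2 j
  ((r2.2.insert r1.1.1 (r2.1.1, r1.1.2 + r2.1.2)).insert r2.1.1 (r2.1.1, r1.1.2 + r2.1.2))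

def stepA (st : PySem.Dict String (String × Int) × List Int) (c : String × String) :
    PySem.Dict String (String × Int) × List Int :=
  let d0 := if st.1.contains c.1 then st.1 else st.1.insert c.1 (c.1, 1)
  let d1 := if d0.contains c.2 then d0 else d0.insert c.2 (c.2, 1)
  let d2 := unionA d1 c.1 c.2
  let r := findA (d2.size + 1) d2 c.1
  (r.2, st.2 ++ [r.1.2])

def solve (par : Int × (List (String × String))) : String :=
  let st := par.2.foldl stepA (PySem.Dict.empty, [])
  PySem.Str.join "\n" (st.2.map PySem.Int.toStr)

-- ===== PORT B =====
-- first pass of B's `_find`: walk parent pointers, returning the visited path and the root tuple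
def walkB (fuel : Nat) (d : PySem.Dict String (String × Int)) (k : String) :
    (List String × (String × Int)) :=
  match fuel with
  | 0 => ([], (k, 0))
  | Nat.succ f =>
    match d.get? k with
    | none => ([], (k, 0))
    | some pc =>
      if pc.1 ≠ k then
        let r := walkB f d pc.1
        (k :: r.1, r.2)
      else ([], pc)

-- second pass: write the root tuple into every visited node (innermost first)
def findB (d : PySem.Dict String (String × Int)) (i : String) :
    ((String × Int) × PySem.Dict String (String × Int)) :=
  let w := walkB (d.size + 1) d i
  (w.2, w.1.reverse.foldl (fun dd n => dd.insert n w.2) d)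

def unionB (d : PySem.Dict String (String × Int)) (i j : String) :
    PySem.Dict String (String × Int) :=
  let r1 := findB d i
  let r2 := findB r1.2 j
  let merged := (r2.1.1, r1.1.2 + r2.1.2)
  ((r2.2.insert r1.1.1 merged).insert r2.1.1 merged)

def stepB (st : PySem.Dict String (String × Int) × List String) (c : String × String) :
    PySem.Dict String (String × Int) × List String :=
  let d0 := if st.1.contains c.1 then st.1 else st.1.insert c.1 (c.1, 1)
  let d1 := if d0.contains c.2 then d0 else d0.insert c.2 (c.2, 1)
  let d2 := unionB d1 c.1 c.2
  let r := findB d2 c.1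
  (r.2, st.2 ++ [PySem.Int.toStr r.1.2])

def solve_alt (par : Int × (List (String × String))) : String :=
  let st := par.2.foldl stepB (PySem.Dict.empty, [])
  PySem.Str.join "\n" st.2

-- ===== PRECONDITION & SPEC =====
def Spec_solve (par : Int × (List (String × String))) (out : String) : Prop := out = solve_alt par
instance (par : Int × (List (String × String))) (out : String) : Decidable (Spec_solve par out) := by unfold Spec_solve; infer_instance

-- ===== CLAIM (what is proved, stated in full; the proofs are below) =====
def Claim_equal_solve : Prop := ∀ (par : Int × (List (String × String))), Dom_solve par → Spec_solve par (solve par)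

-- ===== LEMMAS AND PROOFS =====

-- A's recursive find equals B's two-pass find, fuel for fuel: the root tuple is the one the
-- walk finds, and A's unwind-time compression writes exactly the walk's path, innermost first.
lemma findA_eq_walkB (f : Nat) :
    ∀ (d : PySem.Dict String (String × Int)) (i : String),
      findA f d i =
        ((walkB f d i).2,
         (walkB f d i).1.reverse.foldl (fun dd n => dd.insert n (walkB f d i).2) d) := by
  induction f with
  | zero => intro d i; simp [findA, walkB]
  | succ f ih =>
    intro d i
    simp only [findA, walkB]
    cases h : d.get? i with
    | none => simp
    | some pc =>
      by_cases hne : pc.1 ≠ i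
      · simp [hne, ih d pc.1]
      · simp [hne]

lemma findB_eq (d : PySem.Dict String (String × Int)) (i : String) :
    findB d i = findA (d.size + 1) d i := by
  rw [findA_eq_walkB]; rfl

lemma unionB_eq (d : PySem.Dict String (String × Int)) (i j : String) :
    unionB d i j = unionA d i j := by
  simp only [unionA, unionB, findB_eq]

lemma stepB_eq (d : PySem.Dict String (String × Int)) (res : List Int) (c : String × String) :
    stepB (d, res.map PySem.Int.toStr) c =
      ((stepA (d, res) c).1, (stepA (d, res) c).2.map PySem.Int.toStr) := by
  simp only [stepA, stepB, unionB_eq, findB_eq, List.map_append, List.map_cons, List.map_nil]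

lemma foldl_stepB_eq (comb : List (String × String)) :
    ∀ (d : PySem.Dict String (String × Int)) (res : List Int),
      comb.foldl stepB (d, res.map PySem.Int.toStr) =
        ((comb.foldl stepA (d, res)).1, (comb.foldl stepA (d, res)).2.map PySem.Int.toStr) := by
  induction comb with
  | nil => intro d res; rfl
  | cons c cs ih =>
    intro d res
    simp only [List.foldl_cons, stepB_eq]
    have := ih (stepA (d, res) c).1 (stepA (d, res) c).2
    simpa using this

-- ===== VERDICT (by name: the statement is the Claim_ definition above) =====
theorem solve_spec : Claim_equal_solve := by
  intro par _
  unfold Spec_solve solve solve_alt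
  have h := foldl_stepB_eq par.2 PySem.Dict.empty []
  simp only [List.map_nil] at h
  rw [h]
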